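-- pv_equiv track=rewrite | github.com/bbarclay/collatzconjecture | src/analysis/pattern_shift.py | get_carry_length
-- ===== SOURCE A (Python) =====
-- def get_carry_length(n):
--     """Calculate length of carry chain in 3n+1"""
--     x = 3 * n + 1
--     binary = format(x, "b")
--     carry = 0
--     for i in range(len(binary) - 1, -1, -1):
--         if binary[i] == "1":
--             carry += 1
--         else:
--             break
--     return carry
-- ===== SOURCE B (Python) =====
-- def get_carry_length(n):
--     """Calculate length of carry chain in 3n+1"""
--     y = abs(3 * n + 1)
--     t = y + 1
--     return (t & -t).bit_length() - 1
-- ===== Notes on version B (the rewrite author's own statement) =====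
-- stated objective: simpler
-- what changed: B replaces A's binary-string formatting and per-character reverse scan with the closed-form bit trick ((y+1) & -(y+1)).bit_length() - 1 on y = |3n+1|, eliminating string construction and the loop entirely.
import Mathlib
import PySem

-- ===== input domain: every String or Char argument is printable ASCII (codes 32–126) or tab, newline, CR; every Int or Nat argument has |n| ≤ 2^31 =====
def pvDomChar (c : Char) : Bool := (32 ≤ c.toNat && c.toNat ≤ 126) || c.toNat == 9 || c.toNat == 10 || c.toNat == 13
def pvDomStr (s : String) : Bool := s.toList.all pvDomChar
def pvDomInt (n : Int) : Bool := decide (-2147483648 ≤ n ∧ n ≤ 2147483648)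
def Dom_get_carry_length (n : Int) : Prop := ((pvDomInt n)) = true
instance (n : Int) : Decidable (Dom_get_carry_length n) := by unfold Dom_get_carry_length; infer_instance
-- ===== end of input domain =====

-- B replaces A's binary-string build + reverse character scan by the closed-form
-- bit trick ((y+1) & -(y+1)).bit_length() - 1 on y = |3n+1| (objective: simpler).

-- ===== PORT A =====
-- binary digits of a positive Nat, most-significant first (the digit part of Python's format(x, "b"))
def pvBitChars (m : Nat) : List Char :=
  if m = 0 then [] else pvBitChars (m / 2) ++ [if m % 2 = 1 then '1' else '0']
  termination_by m
  decreasing_by omega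

-- format(x, "b"): '-' prefix for negatives, "0" for zero
def pvFormatB (x : Int) : List Char :=
  if x < 0 then '-' :: pvBitChars x.natAbs
  else if x = 0 then ['0'] else pvBitChars x.toNat

-- the loop 'for i in range(len(binary)-1, -1, -1): if binary[i]=="1": carry += 1 else: break'
-- = scan the characters last-to-first, counting until the first non-'1' (break) or the front
def pvCarryLoop : List Char → Nat
  | [] => 0
  | c :: rest => if c = '1' then 1 + pvCarryLoop rest else 0

def get_carry_length (n : Int) : Int :=
  let x := 3 * n + 1
  let binary := pvFormatB x
  ((pvCarryLoop binary.reverse : Nat) : Int)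

-- ===== PORT B =====
-- y = abs(3n+1); t = y+1; (t & -t).bit_length() - 1.
-- Python's & on ints is Int.land (exact, two's complement); bit_length of a
-- nonnegative int is Nat.size of its magnitude (exact here: t & -t ≥ 0).
def get_carry_length_alt (n : Int) : Int :=
  let y : Nat := (3 * n + 1).natAbs
  let t : Int := (y : Int) + 1
  ((Int.land t (-t)).toNat.size : Int) - 1

-- ===== PRECONDITION & SPEC =====
def Spec_get_carry_length (n : Int) (out : Int) : Prop := out = get_carry_length_alt n
instance (n : Int) (out : Int) : Decidable (Spec_get_carry_length n out) := by unfold Spec_get_carry_length; infer_instance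

-- ===== CLAIM (what is proved, stated in full; the proofs are below) =====
def Claim_equal_get_carry_length : Prop := ∀ (n : Int), Dom_get_carry_length n → Spec_get_carry_length n (get_carry_length n)

-- ===== LEMMAS AND PROOFS =====

-- number of trailing 1-bits of y (the common characterisation of both ports)
def pvTones (y : Nat) : Nat :=
  if y % 2 = 1 then pvTones (y / 2) + 1 else 0
  termination_by y
  decreasing_by omega

theorem pvTones_even (y : Nat) (h : y % 2 = 0) : pvTones y = 0 := by
  unfold pvTones; simp [h]

theorem pvTones_odd (y : Nat) (h : y % 2 = 1) : pvTones y = pvTones (y / 2) + 1 := by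
  conv_lhs => rw [pvTones]
  simp [h]

-- A-side: the reverse scan of the binary digits counts pvTones, for any stopper tail
theorem pvCarryLoop_bitChars (y : Nat) (tail : List Char) (ht : pvCarryLoop tail = 0) :
    pvCarryLoop ((pvBitChars y).reverse ++ tail) = pvTones y := by
  induction y using Nat.strong_induction_on with
  | _ y ih =>
    by_cases hy : y = 0
    · subst hy
      simp [pvBitChars, ht, pvTones_even]
    · rw [pvBitChars]
      simp only [hy, ite_false, List.reverse_append, List.reverse_singleton, List.cons_append]
      rcases Nat.mod_two_eq_zero_or_one y with h2 | h2
      · simp [pvCarryLoop, h2, pvTones_even y h2]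
      · have := ih (y / 2) (by omega)
        simp [pvCarryLoop, h2, this, pvTones_odd y h2, Nat.add_comm]

-- A = pvTones (|3n+1|)
theorem get_carry_length_eq_tones (n : Int) :
    get_carry_length n = (pvTones (3 * n + 1).natAbs : Int) := by
  unfold get_carry_length pvFormatB
  set x := 3 * n + 1 with hx
  rcases lt_trichotomy x 0 with h | h | h
  · simp only [h, if_pos, List.reverse_cons]
    rw [pvCarryLoop_bitChars x.natAbs ['-'] (by simp [pvCarryLoop])]
  · simp [h, pvCarryLoop, pvTones_even]
  · have h0 : ¬ x < 0 := by omega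
    have hne : x ≠ 0 := by omega
    have : x.toNat = x.natAbs := by omega
    simp only [h0, hne, ite_false, this]
    rw [← List.append_nil (pvBitChars x.natAbs).reverse,
      pvCarryLoop_bitChars x.natAbs [] rfl]

theorem pvLdiff_self (k : Nat) : Nat.ldiff k k = 0 := by
  apply Nat.eq_of_testBit_eq
  intro i
  simp [Nat.testBit_ldiff]

-- ldiff of successor against itself isolates the lowest set bit of y+1,
-- i.e. 2 ^ (number of trailing ones of y)
theorem ldiff_succ_self (y : Nat) : Nat.ldiff (y + 1) y = 2 ^ pvTones y := by
  induction y using Nat.strong_induction_on with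
  | _ y ih =>
    rcases Nat.mod_two_eq_zero_or_one y with h2 | h2
    · -- y = 2k : (2k+1) \ 2k = bit true (k \ k) = 1
      obtain ⟨k, rfl⟩ : ∃ k, y = 2 * k := ⟨y / 2, by omega⟩
      have hb1 : 2 * k + 1 = Nat.bit true k := by simp [Nat.bit_val]
      have hb0 : 2 * k = Nat.bit false k := by simp [Nat.bit_val]
      rw [hb1]
      conv_lhs => rw [hb0]
      rw [Nat.ldiff_bit]
      simp [Nat.bit_val, pvLdiff_self, pvTones_even _ h2]
    · -- y = 2k+1 : (2k+2) \ (2k+1) = bit false ((k+1) \ k) = 2 * 2^tones k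
      obtain ⟨k, rfl⟩ : ∃ k, y = 2 * k + 1 := ⟨y / 2, by omega⟩
      have hb0 : 2 * k + 1 + 1 = Nat.bit false (k + 1) := by simp [Nat.bit_val]; omega
      have hb1 : 2 * k + 1 = Nat.bit true k := by simp [Nat.bit_val]
      rw [hb0]
      conv_lhs => rw [hb1]
      rw [Nat.ldiff_bit, ih k (by omega)]
      have hdiv : (2 * k + 1) / 2 = k := by omega
      simp [Nat.bit_val, pvTones_odd _ h2, hdiv, pow_succ]
      ring

-- B = pvTones (|3n+1|)
theorem get_carry_length_alt_eq_tones (n : Int) :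
    get_carry_length_alt n = (pvTones (3 * n + 1).natAbs : Int) := by
  show (((Int.land (((3 * n + 1).natAbs : Int) + 1) (-(((3 * n + 1).natAbs : Int) + 1))).toNat.size : Int) - 1) = _
  generalize (3 * n + 1).natAbs = y
  have hneg : -((y : Int) + 1) = Int.negSucc y := by
    rw [Int.negSucc_eq]
  have hcast : ((y : Int) + 1) = Int.ofNat (y + 1) := by simp
  rw [hneg, hcast]
  have hland : Int.land (Int.ofNat (y + 1)) (Int.negSucc y) = Int.ofNat (Nat.ldiff (y + 1) y) := rfl
  rw [hland, ldiff_succ_self y]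
  have : (Int.ofNat (2 ^ pvTones y)).toNat = 2 ^ pvTones y := rfl
  rw [this, Nat.size_pow]
  push_cast
  ring

-- ===== VERDICT (by name: the statement is the Claim_ definition above) =====
theorem get_carry_length_spec : Claim_equal_get_carry_length := by
  intro n _
  unfold Spec_get_carry_length
  rw [get_carry_length_eq_tones, get_carry_length_alt_eq_tones]
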